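-- pv_equiv track=rewrite | github.com/wjdqlsdlsp/coding_test_practice | scoar/3.py | solution
-- ===== SOURCE A (Python) =====
-- def gcd(a,b):
--     if b == 0:
--         return a
--     return gcd(b, a%b)
--
-- def make_gcd(x, y):
--     if x == 0:
--         x, y = 0, y // abs(y)
--     elif y == 0:
--         x, y = x// abs(x), 0
--     else:
--         i = gcd(abs(x), abs(y))
--         x, y = x//i, y//i
--     return x, y
--
-- def solution(monsters, bullets):
--     answer = 0
--     div_monsters = dict()
--     for x, y, in monsters:
--         x, y = make_gcd(x, y)
--
--         if (x,y) in div_monsters.keys(): div_monsters[(x, y)] +=1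
--         else: div_monsters[(x, y)] =1
--
--     for x, y, in bullets:
--         x, y = make_gcd(x, y)
--
--         if (x,y) in div_monsters.keys() and div_monsters[(x, y)] > 0:
--             div_monsters[(x, y)] -= 1
--             answer += 1
--
--     return -1 if answer == 0 else answer
-- ===== SOURCE B (Python) =====
-- def gcd(a,b):
--     if b == 0:
--         return a
--     return gcd(b, a%b)
--
-- def make_gcd(x, y):
--     if x == 0:
--         x, y = 0, y // abs(y)
--     elif y == 0:
--         x, y = x// abs(x), 0
--     else:
--         i = gcd(abs(x), abs(y))
--         x, y = x//i, y//i
--     return x, y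
--
-- def solution(monsters, bullets):
--     # dict-free: normalize both lists, then one sum of per-direction minima over the distinct bullet directions
--     ms = [make_gcd(x, y) for x, y in monsters]
--     bs = [make_gcd(x, y) for x, y in bullets]
--     total = sum(min(ms.count(d), bs.count(d)) for d in set(bs))
--     return -1 if total == 0 else total
-- ===== Notes on version B (the rewrite author's own statement) =====
-- stated objective: simpler
-- what changed: Replaces A's interleaved greedy dict decrement over bullets by a dict-free formulation: map both lists through make_gcd once, then sum min(ms.count(d), bs.count(d)) over the distinct bullet directions.
import Mathlib
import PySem

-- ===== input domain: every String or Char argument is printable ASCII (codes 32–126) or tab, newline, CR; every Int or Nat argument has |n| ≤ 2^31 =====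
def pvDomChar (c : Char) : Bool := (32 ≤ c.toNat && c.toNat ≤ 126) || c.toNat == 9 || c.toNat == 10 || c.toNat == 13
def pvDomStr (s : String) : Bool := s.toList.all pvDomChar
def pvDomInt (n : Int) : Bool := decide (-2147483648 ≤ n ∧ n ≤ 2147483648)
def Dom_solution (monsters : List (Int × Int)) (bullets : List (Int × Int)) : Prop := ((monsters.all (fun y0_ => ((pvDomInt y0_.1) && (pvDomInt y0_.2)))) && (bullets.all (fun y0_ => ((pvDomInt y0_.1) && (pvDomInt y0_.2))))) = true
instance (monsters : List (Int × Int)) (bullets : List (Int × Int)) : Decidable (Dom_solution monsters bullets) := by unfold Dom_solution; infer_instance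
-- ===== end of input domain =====

-- B is dict-free: it normalizes both lists once and sums per-direction minima of plain list
-- counts over the distinct bullet directions; simpler decomposition, not claimed faster.

-- ===== PORT A =====
-- gcd(a,b): recursion of the Python; terminates because |a % b| < |b| for b ≠ 0
def pyGcd (a b : Int) : Int :=
  if hb0 : b = 0 then a else pyGcd b (PySem.Int.mod a b)
termination_by b.natAbs
decreasing_by
  rcases lt_trichotomy b 0 with hb | hb | hb
  · have h1 := PySem.Int.mod_neg_bounds (a := a) hb
    omega
  · exact absurd hb hb0
  · have h1 := PySem.Int.mod_nonneg (a := a) hb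
    have h2 := PySem.Int.mod_lt (a := a) hb
    omega

-- make_gcd(x,y) (on x = y = 0 the Python divides by zero: excluded by Pre_)
def makeGcd (x y : Int) : Int × Int :=
  if x = 0 then (0, PySem.Int.floordiv y |y|)
  else if y = 0 then (PySem.Int.floordiv x |x|, 0)
  else
    let i := pyGcd |x| |y|
    (PySem.Int.floordiv x i, PySem.Int.floordiv y i)

def solution (monsters : List (Int × Int)) (bullets : List (Int × Int)) : Int :=
  let divMonsters := monsters.foldl (fun d p =>
      let k := makeGcd p.1 p.2
      if d.contains k then d.insert k (d.getD k 0 + 1) else d.insert k 1)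
    (PySem.Dict.empty : PySem.Dict (Int × Int) Int)
  let st := bullets.foldl (fun s p =>
      let k := makeGcd p.1 p.2
      if s.2.contains k ∧ s.2.getD k 0 > 0 then (s.1 + 1, s.2.insert k (s.2.getD k 0 - 1)) else s)
    ((0 : Int), divMonsters)
  if st.1 = 0 then -1 else st.1

-- ===== PORT B =====
def solution_alt (monsters : List (Int × Int)) (bullets : List (Int × Int)) : Int :=
  let ms := monsters.map (fun p => makeGcd p.1 p.2)
  let bs := bullets.map (fun p => makeGcd p.1 p.2)
  let total := ((PySem.Set.ofList bs).map
      (fun d => min ((ms.count d : Int)) ((bs.count d : Int)))).sum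
  if total = 0 then -1 else total

-- ===== PRECONDITION & SPEC =====
-- Pre_ excludes any input containing the pair (0, 0), on which make_gcd (in A and in B alike)
-- raises ZeroDivisionError; A returns normally on every other input.
def Pre_solution (monsters : List (Int × Int)) (bullets : List (Int × Int)) : Prop :=
  (∀ p ∈ monsters, p ≠ ((0 : Int), (0 : Int))) ∧ (∀ p ∈ bullets, p ≠ ((0 : Int), (0 : Int)))
instance (monsters : List (Int × Int)) (bullets : List (Int × Int)) : Decidable (Pre_solution monsters bullets) := by unfold Pre_solution; infer_instance

def pvWitness_solution : (List (Int × Int)) × (List (Int × Int)) :=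
  ([(2, 4), (0, -3)], [(1, 2), (0, -6), (5, 0)])

def Spec_solution (monsters : List (Int × Int)) (bullets : List (Int × Int)) (out : Int) : Prop := out = solution_alt monsters bullets
instance (monsters : List (Int × Int)) (bullets : List (Int × Int)) (out : Int) : Decidable (Spec_solution monsters bullets out) := by unfold Spec_solution; infer_instance

-- ===== CLAIM (what is proved, stated in full; the proofs are below) =====
def Claim_equal_solution : Prop := ∀ (monsters : List (Int × Int)) (bullets : List (Int × Int)), Dom_solution monsters bullets → Pre_solution monsters bullets → Spec_solution monsters bullets (solution monsters bullets)

-- ===== LEMMAS AND PROOFS =====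

-- the guard of A's bullet loop collapses: an absent key reads as 0
lemma contains_and_pos_iff (d : PySem.Dict (Int × Int) Int) (k : Int × Int) :
    (d.contains k = true ∧ d.getD k 0 > 0) ↔ d.getD k 0 > 0 := by
  constructor
  · exact fun h => h.2
  · intro h
    refine ⟨?_, h⟩
    by_cases hb : d.contains k = true
    · exact hb
    · have h0 := PySem.Dict.getD_of_not_contains (d := d) (k := k) (d0 := (0 : Int))
        (by simpa using hb)
      omega

-- A's greedy bullet loop counts, per distinct direction, min(stock, demand)
lemma bullet_loop (ks : List (Int × Int)) (d : PySem.Dict (Int × Int) Int) (a : Int) :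
    (ks.foldl (fun s k =>
        if s.2.contains k ∧ s.2.getD k 0 > 0 then (s.1 + 1, s.2.insert k (s.2.getD k 0 - 1)) else s)
      (a, d)).1
    = a + ∑ j ∈ ks.toFinset, min (max (d.getD j 0) 0) ((ks.count j : Nat) : Int) := by
  induction ks generalizing d a with
  | nil => simp
  | cons k t ih =>
    have hS : (k :: t).toFinset = insert k t.toFinset := by simp
    rw [List.foldl_cons, hS]
    have hins : insert k t.toFinset = insert k (t.toFinset.erase k) := by
      ext x; simp [Finset.mem_insert, Finset.mem_erase]; tauto
    have hsplit : ∀ f : (Int × Int) → Int,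
        ∑ j ∈ insert k t.toFinset, f j = f k + ∑ j ∈ t.toFinset.erase k, f j := by
      intro f
      rw [hins, Finset.sum_insert (Finset.notMem_erase _ _)]
    have hcount : ∀ j ∈ t.toFinset.erase k,
        min (max (d.getD j 0) 0) (((k :: t).count j : Nat) : Int)
          = min (max (d.getD j 0) 0) ((t.count j : Nat) : Int) := by
      intro j hj
      have hne : j ≠ k := (Finset.mem_erase.mp hj).1
      have hne' : ¬ (k = j) := fun h => hne h.symm
      simp [hne']
    rw [hsplit]
    have hck : ((k :: t).count k : Int) = ((t.count k : Nat) : Int) + 1 := by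
      simp
    by_cases hc : d.contains k = true ∧ d.getD k 0 > 0
    · have hv : d.getD k 0 > 0 := hc.2
      rw [if_pos hc, ih]
      have hEg : ∑ j ∈ t.toFinset, min (max ((d.insert k (d.getD k 0 - 1)).getD j 0) 0)
            ((t.count j : Nat) : Int)
          = (if k ∈ t.toFinset then min (max (d.getD k 0 - 1) 0) ((t.count k : Nat) : Int) else 0)
            + ∑ j ∈ t.toFinset.erase k, min (max (d.getD j 0) 0) ((t.count j : Nat) : Int) := by
        by_cases hk : k ∈ t.toFinset
        · rw [if_pos hk, ← Finset.add_sum_erase _ _ hk, PySem.Dict.getD_insert, if_pos rfl]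
          congr 1
          refine Finset.sum_congr rfl (fun j hj => ?_)
          rw [PySem.Dict.getD_insert, if_neg (Finset.mem_erase.mp hj).1]
        · rw [if_neg hk, Finset.erase_eq_of_notMem hk, zero_add]
          refine Finset.sum_congr rfl (fun j hj => ?_)
          have hne : j ≠ k := fun h => hk (h ▸ hj)
          rw [PySem.Dict.getD_insert, if_neg hne]
      rw [hEg, Finset.sum_congr rfl hcount, hck]
      by_cases hk : k ∈ t.toFinset
      · have hcnt : 1 ≤ t.count k := List.count_pos_iff.mpr (List.mem_toFinset.mp hk)
        rw [if_pos hk]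
        omega
      · have hcnt : t.count k = 0 :=
          List.count_eq_zero_of_not_mem (fun h => hk (List.mem_toFinset.mpr h))
        rw [if_neg hk, hcnt]
        omega
    · have hv : ¬ d.getD k 0 > 0 := fun h => hc ((contains_and_pos_iff d k).mpr h)
      rw [if_neg hc, ih]
      have hEg : ∑ j ∈ t.toFinset, min (max (d.getD j 0) 0) ((t.count j : Nat) : Int)
          = (if k ∈ t.toFinset then min (max (d.getD k 0) 0) ((t.count k : Nat) : Int) else 0)
            + ∑ j ∈ t.toFinset.erase k, min (max (d.getD j 0) 0) ((t.count j : Nat) : Int) := by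
        by_cases hk : k ∈ t.toFinset
        · rw [if_pos hk, ← Finset.add_sum_erase _ _ hk]
        · rw [if_neg hk, Finset.erase_eq_of_notMem hk, zero_add]
      rw [hEg, Finset.sum_congr rfl hcount, hck]
      by_cases hk : k ∈ t.toFinset
      · have hcnt : 1 ≤ t.count k := List.count_pos_iff.mpr (List.mem_toFinset.mp hk)
        rw [if_pos hk]
        omega
      · have hcnt : t.count k = 0 :=
          List.count_eq_zero_of_not_mem (fun h => hk (List.mem_toFinset.mpr h))
        rw [if_neg hk, hcnt]
        omega

-- A's per-pair folds, rewritten as folds over the mapped normalized-key list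
lemma monsterA_fold_eq (l : List (Int × Int)) :
    l.foldl (fun d p =>
        if d.contains (makeGcd p.1 p.2) then
          d.insert (makeGcd p.1 p.2) (d.getD (makeGcd p.1 p.2) 0 + 1)
        else d.insert (makeGcd p.1 p.2) 1)
      (PySem.Dict.empty : PySem.Dict (Int × Int) Int)
    = (l.map (fun p => makeGcd p.1 p.2)).foldl
        (fun d k => if d.contains k then d.insert k (d.getD k 0 + 1) else d.insert k 1)
        PySem.Dict.empty := by
  rw [List.foldl_map]

lemma bullet_fold_eq (l : List (Int × Int)) (init : Int × PySem.Dict (Int × Int) Int) :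
    l.foldl (fun s p =>
        if s.2.contains (makeGcd p.1 p.2) ∧ s.2.getD (makeGcd p.1 p.2) 0 > 0 then
          (s.1 + 1, s.2.insert (makeGcd p.1 p.2) (s.2.getD (makeGcd p.1 p.2) 0 - 1))
        else s) init
    = (l.map (fun p => makeGcd p.1 p.2)).foldl
        (fun s k =>
          if s.2.contains k ∧ s.2.getD k 0 > 0 then (s.1 + 1, s.2.insert k (s.2.getD k 0 - 1))
          else s) init := by
  rw [List.foldl_map]

-- A's monster dict stores exactly the occurrence counts of the normalized list
lemma monster_dict_getD (ks : List (Int × Int)) (j : Int × Int) :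
    (ks.foldl (fun d k => if d.contains k then d.insert k (d.getD k 0 + 1) else d.insert k 1)
        (PySem.Dict.empty : PySem.Dict (Int × Int) Int)).getD j 0
    = ((ks.count j : Nat) : Int) := by
  have hfold : ks.foldl (fun d k => if d.contains k then d.insert k (d.getD k 0 + 1) else d.insert k 1)
      (PySem.Dict.empty : PySem.Dict (Int × Int) Int)
      = ks.foldl (fun d k => d.insert k (d.getD k 0 + 1)) PySem.Dict.empty := by
    apply PySem.List.foldl_congr_mem
    intro d k _
    by_cases hb : d.contains k = true
    · rw [if_pos hb]
    · have h0 := PySem.Dict.getD_of_not_contains (d := d) (k := k) (d0 := (0 : Int))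
        (by simpa using hb)
      rw [if_neg (by simpa using hb), h0, zero_add]
  rw [hfold, PySem.Dict.getD_foldl_insert_add_one]
  simp

-- B's sum over set(bs), as a Finset sum over the distinct normalized bullets
lemma alt_sum_eq (ms ks : List (Int × Int)) :
    ((PySem.Set.ofList ks).map (fun d => min ((ms.count d : Int)) ((ks.count d : Int)))).sum
    = ∑ j ∈ ks.toFinset, min ((ms.count j : Nat) : Int) ((ks.count j : Nat) : Int) := by
  have hnd : (PySem.Set.ofList ks).Nodup := PySem.Set.nodup_ofList ks
  have htf : (PySem.Set.ofList ks).toFinset = ks.toFinset := by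
    apply Finset.ext
    intro j
    simp [List.mem_toFinset, PySem.Set.mem_ofList]
  rw [← List.sum_toFinset (l := PySem.Set.ofList ks) (fun d => min ((ms.count d : Int)) ((ks.count d : Int))) hnd, htf]

-- ===== VERDICT (by name: the statement is the Claim_ definition above) =====
theorem solution_spec : Claim_equal_solution := by
  unfold Claim_equal_solution
  intro monsters bullets _ _
  unfold Spec_solution
  simp only [solution, solution_alt]
  simp only [monsterA_fold_eq, bullet_fold_eq]
  rw [bullet_loop, alt_sum_eq, zero_add]
  have hsum : ∀ j ∈ (bullets.map (fun p => makeGcd p.1 p.2)).toFinset,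
      min (max (((monsters.map (fun p => makeGcd p.1 p.2)).foldl
            (fun d k => if d.contains k then d.insert k (d.getD k 0 + 1) else d.insert k 1)
            PySem.Dict.empty).getD j 0) 0)
          (((bullets.map (fun p => makeGcd p.1 p.2)).count j : Nat) : Int)
      = min (((monsters.map (fun p => makeGcd p.1 p.2)).count j : Nat) : Int)
          (((bullets.map (fun p => makeGcd p.1 p.2)).count j : Nat) : Int) := by
    intro j _
    rw [monster_dict_getD, max_eq_left (Int.natCast_nonneg _)]
  rw [Finset.sum_congr rfl hsum]
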